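-- pv_equiv track=rewrite | github.com/chompaa/advent-of-code | 2023/13/solver.py | get_reflection_lines
-- ===== SOURCE A (Python) =====
-- import itertools
--
-- def get_reflection_lines(mirror, smudges=0):
--     for row in list(itertools.pairwise(range(len(mirror)))):
--         amount = min(abs(0 - row[0]), abs(len(mirror) - row[1] - 1))
--
--         smudge_count = sum(
--             sum(s != r for s, r in zip(mirror[src], mirror[row[0] + row[1] - src]))
--             for src in range(row[0] - amount, row[1])
--         )
--
--         if smudge_count == smudges:
--             return row
-- ===== SOURCE B (Python) =====
-- def get_reflection_lines(mirror, smudges=0):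
--     n = len(mirror)
--     # stage 1: dedupe rows (first-occurrence order) and map each row to its id
--     rows = []
--     for s in mirror:
--         if s not in rows:
--             rows.append(s)
--     rid = [rows.index(s) for s in mirror]
--     # stage 2: full mismatch table between distinct rows (character work happens once here)
--     diff = [[sum(x != y for x, y in zip(ra, rb)) for rb in rows] for ra in rows]
--     # stage 3: each candidate axis is a pure table-lookup sum
--     for i in range(n - 1):
--         width = min(i + 1, n - 1 - i)
--         if sum(diff[rid[src]][rid[2 * i + 1 - src]] for src in range(i - width + 1, i + 1)) == smudges:
--             return (i, i + 1)
-- ===== Notes on version B (the rewrite author's own statement) =====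
-- stated objective: alternative
-- what changed: B is three staged passes instead of A's single nested counting loop: it dedupes rows to first-occurrence ids, precomputes the full character-mismatch table between distinct rows once, and then each candidate axis is a pure table-lookup sum with no character comparisons; this trades table-building work on all-distinct rows for large wins when rows repeat.
import Mathlib
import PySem

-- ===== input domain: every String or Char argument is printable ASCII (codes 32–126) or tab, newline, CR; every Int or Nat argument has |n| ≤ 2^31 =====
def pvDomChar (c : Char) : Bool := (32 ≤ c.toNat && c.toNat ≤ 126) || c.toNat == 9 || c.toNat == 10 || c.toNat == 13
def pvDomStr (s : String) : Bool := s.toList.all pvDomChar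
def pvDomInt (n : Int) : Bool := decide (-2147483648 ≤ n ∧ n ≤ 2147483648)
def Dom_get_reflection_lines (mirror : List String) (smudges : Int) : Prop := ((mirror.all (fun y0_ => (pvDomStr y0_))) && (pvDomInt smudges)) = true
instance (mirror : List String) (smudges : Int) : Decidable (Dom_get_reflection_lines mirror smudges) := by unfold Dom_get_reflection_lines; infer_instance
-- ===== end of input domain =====

-- B replaces A's nested on-the-fly character counting by three staged passes: dedupe rows to
-- first-occurrence ids, precompute the mismatch table between distinct rows once, then each
-- candidate axis is a pure table-lookup sum; return value identical.

-- sum(s != r for s, r in zip(a, b))  — the identical expression appears in both Pythons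
def pvRowDiff (a b : List Char) : Int :=
  ((a.zip b).map (fun p => if p.1 ≠ p.2 then (1 : Int) else 0)).sum

-- ===== PORT A =====
-- inner double sum: smudge_count for row = (i, i+1)
def pvCountA (mirror : List String) (i : Int) : Int :=
  let amount : Int := min |0 - i| |(mirror.length : Int) - (i + 1) - 1|
  ((PySem.List.pyRange (i - amount) (i + 1) 1).map (fun src =>
      pvRowDiff (PySem.List.pyGetD mirror src "").toList
                (PySem.List.pyGetD mirror (i + (i + 1) - src) "").toList)).sum

-- for row in pairwise(range(len(mirror))): …  — row = (i, i+1) for i in range(len-1)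
def pvLoopA (mirror : List String) (smudges : Int) : List Int → Option (List Int)
  | [] => none
  | i :: rest =>
      if pvCountA mirror i = smudges then some [i, i + 1]
      else pvLoopA mirror smudges rest

def get_reflection_lines (mirror : List String) (smudges : Int) : Option (List Int) :=
  pvLoopA mirror smudges (PySem.List.pyRange 0 ((mirror.length : Int) - 1) 1)

-- ===== PORT B =====
-- rows = []; for s in mirror: if s not in rows: rows.append(s)
def pvRows (mirror : List String) : List String :=
  mirror.foldl (fun rows s => if s ∈ rows then rows else rows ++ [s]) []

-- rid = [rows.index(s) for s in mirror]   (.getD 0 is a totality guard: s is always in rows)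
def pvRid (mirror : List String) : List Int :=
  mirror.map (fun s => ((PySem.List.index? (pvRows mirror) s).getD 0 : Nat))

-- diff = [[sum(x != y for x, y in zip(ra, rb)) for rb in rows] for ra in rows]
def pvDiff (rows : List String) : List (List Int) :=
  rows.map (fun ra => rows.map (fun rb => pvRowDiff ra.toList rb.toList))

-- sum(diff[rid[src]][rid[2*i+1-src]] for src in range(i-width+1, i+1))  with width = min(i+1, n-1-i)
def pvAxisCount (rid : List Int) (diff : List (List Int)) (n i : Int) : Int :=
  let width : Int := min (i + 1) (n - 1 - i)
  ((PySem.List.pyRange (i - width + 1) (i + 1) 1).map (fun src =>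
      PySem.List.pyGetD
        (PySem.List.pyGetD diff (PySem.List.pyGetD rid src 0) [])
        (PySem.List.pyGetD rid (2 * i + 1 - src) 0) 0)).sum

-- for i in range(n - 1): …
def pvLoopB (rid : List Int) (diff : List (List Int)) (smudges n : Int) :
    List Int → Option (List Int)
  | [] => none
  | i :: rest =>
      if pvAxisCount rid diff n i = smudges then some [i, i + 1]
      else pvLoopB rid diff smudges n rest

def get_reflection_lines_alt (mirror : List String) (smudges : Int) : Option (List Int) :=
  pvLoopB (pvRid mirror) (pvDiff (pvRows mirror)) smudges (mirror.length : Int)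
    (PySem.List.pyRange 0 ((mirror.length : Int) - 1) 1)

-- ===== PRECONDITION & SPEC =====
def Spec_get_reflection_lines (mirror : List String) (smudges : Int) (out : Option (List Int)) : Prop := out = get_reflection_lines_alt mirror smudges
instance (mirror : List String) (smudges : Int) (out : Option (List Int)) : Decidable (Spec_get_reflection_lines mirror smudges out) := by unfold Spec_get_reflection_lines; infer_instance

-- ===== CLAIM (what is proved, stated in full; the proofs are below) =====
def Claim_equal_get_reflection_lines : Prop := ∀ (mirror : List String) (smudges : Int), Dom_get_reflection_lines mirror smudges → Spec_get_reflection_lines mirror smudges (get_reflection_lines mirror smudges)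

-- ===== LEMMAS AND PROOFS =====

-- every row of mirror appears in the deduplicated list
theorem pvMem_rows (mirror : List String) (s : String) (hs : s ∈ mirror) : s ∈ pvRows mirror := by
  have main : ∀ (xs : List String) (acc : List String) (s : String),
      s ∈ acc ∨ s ∈ xs → s ∈ xs.foldl (fun rows t => if t ∈ rows then rows else rows ++ [t]) acc := by
    intro xs
    induction xs with
    | nil => intro acc s h; simpa using h.resolve_right (by simp)
    | cons x t ih =>
        intro acc s h
        rw [List.foldl_cons]
        apply ih
        by_cases hx : x ∈ acc
        · rw [if_pos hx]
          rcases h with h | h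
          · exact Or.inl h
          · rcases List.mem_cons.mp h with rfl | h
            · exact Or.inl hx
            · exact Or.inr h
        · rw [if_neg hx]
          rcases h with h | h
          · exact Or.inl (List.mem_append_left _ h)
          · rcases List.mem_cons.mp h with rfl | h
            · exact Or.inl (by simp)
            · exact Or.inr h
  exact main mirror [] s (Or.inr hs)

-- rid[p] is a valid index into rows pointing back at mirror[p]
theorem pvRid_spec (mirror : List String) (p : Int)
    (h0 : 0 ≤ p) (h1 : p < (mirror.length : Int)) :
    ∃ k : Nat, PySem.List.pyGetD (pvRid mirror) p 0 = (k : Int) ∧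
      k < (pvRows mirror).length ∧ (pvRows mirror)[k]? = mirror[p.toNat]? := by
  have hp : p.toNat < mirror.length := by omega
  have hmem : mirror[p.toNat] ∈ mirror := List.getElem_mem hp
  have hrows := pvMem_rows mirror _ hmem
  obtain ⟨k, hk⟩ := Option.isSome_iff_exists.mp
    ((PySem.List.index?_isSome_iff (pvRows mirror) mirror[p.toNat]).mpr hrows)
  obtain ⟨hlt, hkv, -⟩ := PySem.List.getElem_of_index?_eq_some hk
  refine ⟨k, ?_, hlt, ?_⟩
  · rw [PySem.List.pyGetD_eq_getElem (pvRid mirror) 0 h0 (by simpa [pvRid] using h1)]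
    simp only [pvRid, List.getElem_map, hk, Option.getD_some]
  · rw [List.getElem?_eq_getElem hlt, List.getElem?_eq_getElem hp, hkv]

-- a table lookup is the row difference of the rows the ids point at
theorem pvDiff_lookup (rows : List String) (a b : Nat)
    (ha : a < rows.length) (hb : b < rows.length) :
    PySem.List.pyGetD (PySem.List.pyGetD (pvDiff rows) (a : Int) []) (b : Int) 0
      = pvRowDiff rows[a].toList rows[b].toList := by
  rw [PySem.List.pyGetD_eq_getElem (pvDiff rows) [] (by positivity) (by simpa [pvDiff] using ha)]
  simp only [pvDiff, List.getElem_map]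
  rw [PySem.List.pyGetD_eq_getElem _ 0 (by positivity) (by simpa using hb)]
  simp

-- B's table-lookup sum equals A's character-count sum at each admitted axis
theorem pvAxisCount_eq (mirror : List String) (i : Int)
    (hi0 : 0 ≤ i) (hi1 : i < (mirror.length : Int) - 1) :
    pvAxisCount (pvRid mirror) (pvDiff (pvRows mirror)) (mirror.length : Int) i
      = pvCountA mirror i := by
  simp only [pvAxisCount, pvCountA]
  have hnn : (0 : Int) ≤ (mirror.length : Int) - (i + 1) - 1 := by omega
  rw [abs_of_nonpos (show (0 : Int) - i ≤ 0 by omega), abs_of_nonneg hnn]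
  have hstart : i - min (-(0 - i)) ((mirror.length : Int) - (i + 1) - 1)
      = i - min (i + 1) ((mirror.length : Int) - 1 - i) + 1 := by omega
  rw [hstart]
  apply congrArg
  apply List.map_congr_left
  intro src hsrc
  obtain ⟨hs1, hs2⟩ := PySem.List.mem_pyRange_one.mp hsrc
  have hw : (0 : Int) < min (i + 1) ((mirror.length : Int) - 1 - i) := by omega
  have hsrc0 : 0 ≤ src := by omega
  have hsrcn : src < (mirror.length : Int) := by omega
  have ht0 : 0 ≤ 2 * i + 1 - src := by omega
  have htn : 2 * i + 1 - src < (mirror.length : Int) := by omega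
  obtain ⟨a, ha_eq, ha_lt, ha_g⟩ := pvRid_spec mirror src hsrc0 hsrcn
  obtain ⟨b, hb_eq, hb_lt, hb_g⟩ := pvRid_spec mirror (2 * i + 1 - src) ht0 htn
  rw [ha_eq, hb_eq, pvDiff_lookup (pvRows mirror) a b ha_lt hb_lt]
  have ha' : (pvRows mirror)[a] = mirror[src.toNat]'(by omega) := by
    have := ha_g
    rw [List.getElem?_eq_getElem ha_lt, List.getElem?_eq_getElem (by omega : src.toNat < mirror.length)] at this
    exact Option.some.inj this
  have hb' : (pvRows mirror)[b] = mirror[(2 * i + 1 - src).toNat]'(by omega) := by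
    have := hb_g
    rw [List.getElem?_eq_getElem hb_lt,
      List.getElem?_eq_getElem (by omega : (2 * i + 1 - src).toNat < mirror.length)] at this
    exact Option.some.inj this
  have harg : i + (i + 1) - src = 2 * i + 1 - src := by ring
  rw [harg, ha', hb',
    PySem.List.pyGetD_eq_getElem mirror "" hsrc0 hsrcn,
    PySem.List.pyGetD_eq_getElem mirror "" ht0 htn]

theorem pvMain (mirror : List String) (smudges : Int) :
    ∀ l : List Int, (∀ i ∈ l, 0 ≤ i ∧ i < (mirror.length : Int) - 1) →
      pvLoopA mirror smudges l
        = pvLoopB (pvRid mirror) (pvDiff (pvRows mirror)) smudges (mirror.length : Int) l := by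
  intro l
  induction l with
  | nil => intro _; rfl
  | cons i rest ih =>
      intro hall
      obtain ⟨hi0, hi1⟩ := hall i List.mem_cons_self
      have hrest := ih (fun j hj => hall j (List.mem_cons_of_mem _ hj))
      simp only [pvLoopA, pvLoopB, pvAxisCount_eq mirror i hi0 hi1]
      split
      · rfl
      · exact hrest

-- ===== VERDICT (by name: the statement is the Claim_ definition above) =====
theorem get_reflection_lines_spec : Claim_equal_get_reflection_lines := by
  intro mirror smudges _
  unfold Spec_get_reflection_lines get_reflection_lines get_reflection_lines_alt
  exact pvMain mirror smudges _ (fun i hi => by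
    simpa using (PySem.List.mem_pyRange_one.mp hi))
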